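-- pv_equiv track=rewrite | github.com/EuanScottWatson/Towers-of-Hanoi | hanoi.py | count
-- ===== SOURCE A (Python) =====
-- def count(number):
--     # Simple incremementor for binary numbers
--     digit = len(number) - 1
--     while not all(number):
--         if number[digit] == 0:
--             number[digit] = 1
--             # Return the digit that was toggled to a 1 for the solution
--             return number, len(number) - digit
--         elif number[digit] == 1:
--             number[digit] = 0
--             digit -= 1
--     return number, -1
-- ===== SOURCE B (Python) =====
-- def count(number):
--     # Arithmetic binary increment: convert to an int, add 1, write bits back.
--     if all(number):
--         return number, -1
--     val = 0
--     for b in number: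
--         val = val * 2 + b
--     m = val + 1
--     pos = (m ^ val).bit_length()
--     for i in range(len(number) - 1, -1, -1):
--         number[i] = m & 1
--         m >>= 1
--     return number, pos
-- ===== Notes on version B (the rewrite author's own statement) =====
-- stated objective: alternative
-- what changed: Replaces the right-to-left flip-and-stop scan (which rechecks all(number) every iteration) by integer arithmetic: build the value of the bit list, add 1, write the bits back over the same length, and read the toggled position off (m ^ val).bit_length().
-- outside the precondition, e.g. on count([2, 0]): A returns ([2, 1], 1), B returns ([0, 1], 1)
import Mathlib
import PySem

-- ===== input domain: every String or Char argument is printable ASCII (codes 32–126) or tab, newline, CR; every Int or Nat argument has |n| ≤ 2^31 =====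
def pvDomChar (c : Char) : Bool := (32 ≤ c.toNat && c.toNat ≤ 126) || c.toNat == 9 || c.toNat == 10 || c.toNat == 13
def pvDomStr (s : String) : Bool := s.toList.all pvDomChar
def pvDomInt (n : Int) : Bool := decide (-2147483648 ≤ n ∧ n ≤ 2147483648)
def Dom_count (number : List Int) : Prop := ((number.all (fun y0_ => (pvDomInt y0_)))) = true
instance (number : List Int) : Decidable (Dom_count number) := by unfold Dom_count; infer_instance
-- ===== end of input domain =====

-- B replaces A's right-to-left flip-and-stop scan by integer arithmetic (value+1, bits written
-- back, toggled position from (m ^ val).bit_length()); both mutate the list identically in Python,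
-- the theorem is about the returned pair.

-- ===== PORT A =====
-- while-loop of A as fuel recursion; fuel number.length+1 suffices on Pre_ (the loop moves digit
-- left each iteration); the fuel-0 / IndexError / non-binary-element branches are unreachable on Pre_.
def countLoopA (number : List Int) (digit : Int) : Nat → List Int × Int
  | 0 => (number, -1)
  | fuel + 1 =>
    if number.all (fun x => x != 0) then (number, -1)
    else
      match PySem.List.pyGet? number digit with
      | none => (number, -1)
      | some v =>
        if v = 0 then (PySem.List.pySetD number digit 1, (number.length : Int) - digit)
        else if v = 1 then countLoopA (PySem.List.pySetD number digit 0) (digit - 1) fuel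
        else countLoopA number digit fuel

def count (number : List Int) : List Int × Int :=
  countLoopA number ((number.length : Int) - 1) (number.length + 1)

-- ===== PORT B =====
-- the write-back loop 'for i in range(len-1,-1,-1): number[i] = m & 1; m >>= 1' of Source B
def writeBits : Nat → Int → List Int
  | 0, _ => []
  | n + 1, m => writeBits n (m >>> (1:Nat)) ++ [PySem.Int.band m 1]

def count_alt (number : List Int) : List Int × Int :=
  if number.all (fun x => x != 0) then (number, -1)
  else
    let val := number.foldl (fun a b => a * 2 + b) 0
    let m := val + 1
    let pos : Int := PySem.Int.bitLength (PySem.Int.bxor m val)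
    (writeBits number.length m, pos)

-- ===== PRECONDITION & SPEC =====
-- Pre_ excludes lists that mix a zero with a digit outside {0,1}: there A either loops forever
-- (non-binary digit right of a zero) or returns a list with stale non-binary digits left in place
-- (e.g. [2,0]), an artefact of flipping only the scanned suffix; B rewrites every digit.
def Pre_count (number : List Int) : Prop :=
  (∀ x ∈ number, x ≠ 0) ∨ (∀ x ∈ number, x = 0 ∨ x = 1)
instance (number : List Int) : Decidable (Pre_count number) := by unfold Pre_count; infer_instance

def pvWitness_count : List Int := [1, 0, 1]

def Spec_count (number : List Int) (out : List Int × Int) : Prop := out = count_alt number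
instance (number : List Int) (out : List Int × Int) : Decidable (Spec_count number out) := by unfold Spec_count; infer_instance

-- ===== CLAIM (what is proved, stated in full; the proofs are below) =====
def Claim_equal_count : Prop := ∀ (number : List Int), Dom_count number → Pre_count number → Spec_count number (count number)

-- ===== LEMMAS AND PROOFS =====

-- binary value of a bit list (proof-side abbreviation for Source B's first loop)
def bval (xs : List Int) : Int := xs.foldl (fun a b => a * 2 + b) 0

theorem foldl_val (xs : List Int) (a : Int) :
    xs.foldl (fun a b => a * 2 + b) a = a * 2 ^ xs.length + bval xs := by
  induction xs generalizing a with
  | nil => simp [bval]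
  | cons x xs ih =>
    simp only [List.foldl_cons, List.length_cons, bval]
    rw [ih (a * 2 + x), ih (0 * 2 + x)]
    show _ = _ + (_ * 2 ^ xs.length + bval xs)
    ring

theorem bval_append (xs ys : List Int) :
    bval (xs ++ ys) = bval xs * 2 ^ ys.length + bval ys := by
  simp only [bval, List.foldl_append]
  exact foldl_val ys (bval xs)

theorem bval_cons (x : Int) (xs : List Int) :
    bval (x :: xs) = x * 2 ^ xs.length + bval xs := by
  have h := bval_append [x] xs
  simp only [List.singleton_append] at h
  rw [h]
  have : bval [x] = x := by simp [bval]
  rw [this]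

theorem bval_replicate_one (k : Nat) : bval (List.replicate k 1) = 2 ^ k - 1 := by
  induction k with
  | zero => simp [bval]
  | succ k ih =>
    rw [List.replicate_succ, bval_cons, ih]
    simp [pow_succ]; ring

theorem bval_replicate_zero (k : Nat) : bval (List.replicate k 0) = 0 := by
  induction k with
  | zero => simp [bval]
  | succ k ih => rw [List.replicate_succ, bval_cons, ih]; simp

theorem bval_nonneg (xs : List Int) (h : ∀ x ∈ xs, x = 0 ∨ x = 1) : 0 ≤ bval xs := by
  induction xs using List.reverseRecOn with
  | nil => simp [bval]
  | append_singleton ys b ih =>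
    have hb : b = 0 ∨ b = 1 := h b (by simp)
    have hys : 0 ≤ bval ys := ih (fun x hx => h x (by simp [hx]))
    rw [bval_append]
    have : bval [b] = b := by simp [bval]
    rw [this]
    simp only [List.length_cons, List.length_nil]
    rcases hb with rfl | rfl <;> omega

-- shift/mask facts used by writeBits_bval
theorem shift_two_mul_add (v b : Int) (hb : b = 0 ∨ b = 1) :
    (v * 2 + b) >>> (1:Nat) = v := by
  rw [Int.shiftRight_eq_div_pow]; push_cast; omega

theorem band_two_mul_add (v b : Int) (hb : b = 0 ∨ b = 1) :
    PySem.Int.band (v * 2 + b) 1 = b := by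
  rw [PySem.Int.band_one]
  show (v * 2 + b).fmod 2 = b
  rw [Int.fmod_eq_emod]
  simp
  omega

theorem writeBits_bval (xs : List Int) (h : ∀ x ∈ xs, x = 0 ∨ x = 1) :
    writeBits xs.length (bval xs) = xs := by
  induction xs using List.reverseRecOn with
  | nil => simp [writeBits, bval]
  | append_singleton ys b ih =>
    have hb : b = 0 ∨ b = 1 := h b (by simp)
    have hys : ∀ x ∈ ys, x = 0 ∨ x = 1 := fun x hx => h x (by simp [hx])
    have hv : 0 ≤ bval ys := bval_nonneg ys hys
    have hval : bval (ys ++ [b]) = bval ys * 2 + b := by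
      rw [bval_append]
      have : bval [b] = b := by simp [bval]
      rw [this]; simp
    rw [hval, show (ys ++ [b]).length = ys.length + 1 by simp]
    show writeBits ys.length ((bval ys * 2 + b) >>> (1:Nat)) ++ [PySem.Int.band (bval ys * 2 + b) 1]
        = ys ++ [b]
    rw [shift_two_mul_add _ _ hb, band_two_mul_add _ _ hb, ih hys]

-- setting an element of the right part of an append
theorem set_append_add (L R : List Int) (i : Nat) (v : Int) :
    (L ++ R).set (L.length + i) v = L ++ R.set i v := by
  induction L with
  | nil => simp
  | cons x L ih => simp [Nat.succ_add, ih]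

-- A's loop on a list 'L ++ 0 :: (replicate j 1 ++ T)' with digit pointing at the last 1
theorem loopA (j : Nat) : ∀ (L T : List Int) (fuel : Nat), j + 1 ≤ fuel →
    countLoopA (L ++ 0 :: (List.replicate j 1 ++ T)) ((L.length : Int) + j) fuel
      = (L ++ 1 :: (List.replicate j 0 ++ T), (j : Int) + 1 + T.length) := by
  induction j with
  | zero =>
    intro L T fuel hf
    obtain ⟨f, rfl⟩ : ∃ f, fuel = f + 1 := ⟨fuel - 1, by omega⟩
    simp only [Nat.cast_zero, add_zero, List.replicate_zero, List.nil_append]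
    have hall : (L ++ 0 :: T).all (fun x => x != 0) = false := by simp
    have hidx : PySem.List.pyGet? (L ++ 0 :: T) ((L.length : Nat) : Int) = some 0 := by
      rw [PySem.List.pyGet?_natCast, List.getElem?_append_right (le_refl _)]
      simp
    simp only [countLoopA, hall, Bool.false_eq_true, if_false, hidx]
    simp only [if_true]
    simp only [Prod.mk.injEq]
    refine ⟨?_, ?_⟩
    · rw [PySem.List.pySetD_natCast, show L.length = L.length + 0 from rfl, set_append_add]
      simp
    · simp only [List.length_append, List.length_cons]
      push_cast
      ring
  | succ j ih =>
    intro L T fuel hf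
    obtain ⟨f, rfl⟩ : ∃ f, fuel = f + 1 := ⟨fuel - 1, by omega⟩
    have hsplit : List.replicate (j + 1) (1 : Int) ++ T = List.replicate j 1 ++ 1 :: T := by
      rw [List.replicate_succ']; simp
    have hcast : ((L.length : Int) + ((j + 1 : Nat) : Int)) = ((L.length + (j + 1) : Nat) : Int) := by
      push_cast; ring
    rw [hcast]
    have hall : (L ++ 0 :: (List.replicate (j+1) 1 ++ T)).all (fun x => x != 0) = false := by simp
    have hidx : PySem.List.pyGet? (L ++ 0 :: (List.replicate (j+1) 1 ++ T))
        ((L.length + (j + 1) : Nat) : Int) = some 1 := by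
      rw [PySem.List.pyGet?_natCast,
        List.getElem?_append_right (by simp)]
      rw [show L.length + (j + 1) - L.length = j + 1 by omega]
      rw [show (0 : Int) :: (List.replicate (j+1) 1 ++ T) = ((0 : Int) :: List.replicate (j+1) 1) ++ T by simp]
      rw [List.getElem?_append_left (by simp)]
      simp
    simp only [countLoopA, hall, Bool.false_eq_true, if_false, hidx]
    simp only [if_true]
    have hset : PySem.List.pySetD (L ++ 0 :: (List.replicate (j+1) 1 ++ T))
        (((L.length + (j + 1) : Nat) : Int)) 0 = L ++ 0 :: (List.replicate j 1 ++ (0 :: T)) := by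
      rw [PySem.List.pySetD_natCast, hsplit]
      rw [show L ++ 0 :: (List.replicate j 1 ++ 1 :: T)
            = (L ++ 0 :: List.replicate j 1) ++ (1 :: T) by simp]
      rw [show L.length + (j + 1) = (L ++ 0 :: List.replicate j 1).length + 0 by
        simp only [List.length_append, List.length_cons, List.length_replicate]; omega]
      rw [set_append_add]
      simp
    rw [hset, show (((L.length + (j + 1) : Nat) : Int)) - 1 = (L.length : Int) + j by push_cast; ring]
    rw [ih L (0 :: T) f (by omega), if_neg (by norm_num : ¬(1:Int) = 0)]
    simp only [Prod.mk.injEq]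
    refine ⟨?_, ?_⟩
    · rw [List.replicate_succ']; simp
    · simp only [List.length_cons]
      push_cast
      ring

-- xor key fact at Nat level, proved bitwise
theorem nat_xor_key (a k : Nat) :
    (2 ^ (k + 1) * a + 2 ^ k) ^^^ (2 ^ (k + 1) * a + (2 ^ k - 1)) = 2 ^ (k + 1) - 1 := by
  apply Nat.eq_of_testBit_eq
  intro i
  have h1 : (2 : Nat) ^ k < 2 ^ (k + 1) := Nat.pow_lt_pow_right (by norm_num) (by omega)
  have hk : (0 : Nat) < 2 ^ k := Nat.pow_pos (by norm_num)
  have hlt : (2 : Nat) ^ k - 1 < 2 ^ (k + 1) := by omega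
  rw [Nat.testBit_xor, Nat.testBit_two_pow_mul_add a h1 i,
    Nat.testBit_two_pow_mul_add a hlt i, Nat.testBit_two_pow_sub_one]
  by_cases hik : i < k + 1
  · simp only [if_pos hik, Nat.testBit_two_pow, Nat.testBit_two_pow_sub_one]
    by_cases hik' : i < k
    · simp [hik', show ¬ k = i by omega, hik]
    · have hki : k = i := by omega
      simp [hki]
  · simp only [if_neg hik, Bool.xor_self]
    simp [hik]

-- bit_length of 2^n - 1 is n
theorem bitLength_ones (n : Nat) : PySem.Int.bitLength (((2 ^ n - 1 : Nat) : Int)) = n := by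
  induction n with
  | zero => simp [PySem.Int.bitLength_zero]
  | succ n ih =>
    have hn : (0 : Nat) < 2 ^ n := Nat.pow_pos (by norm_num)
    have h2 : (2 : Nat) ^ (n + 1) = 2 * 2 ^ n := by ring
    rw [PySem.Int.bitLength_natCast (by omega)]
    rw [show (2 ^ (n + 1) - 1) / 2 = 2 ^ n - 1 by omega, ih]

-- trailing-ones decomposition of a binary list containing a zero
theorem decomp (xs : List Int) (hbin : ∀ x ∈ xs, x = 0 ∨ x = 1) (hz : ∃ x ∈ xs, x = 0) :
    ∃ L k, xs = L ++ 0 :: List.replicate k 1 ∧ (∀ x ∈ L, x = 0 ∨ x = 1) := by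
  induction xs using List.reverseRecOn with
  | nil => simp at hz
  | append_singleton ys b ih =>
    have hbys : ∀ x ∈ ys, x = 0 ∨ x = 1 := fun x hx => hbin x (by simp [hx])
    rcases hbin b (by simp) with rfl | rfl
    · exact ⟨ys, 0, by simp, hbys⟩
    · have hzys : ∃ x ∈ ys, x = 0 := by
        rcases hz with ⟨x, hx, rfl⟩
        have : (0 : Int) ∈ ys := by
          have h01 : ((0 : Int) ∈ ys) ∨ ((0 : Int) ∈ [(1 : Int)]) := by
            simpa using List.mem_append.mp hx
          rcases h01 with h | h
          · exact h
          · simp at h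
        exact ⟨0, this, rfl⟩
      obtain ⟨L, k, rfl, hL⟩ := ih hbys hzys
      exact ⟨L, k + 1, by rw [List.replicate_succ']; simp, hL⟩

-- ===== VERDICT (by name: the statement is the Claim_ definition above) =====
theorem count_spec : Claim_equal_count := by
  intro number hdom hpre
  unfold Spec_count
  by_cases hall : number.all (fun x => x != 0)
  · unfold count count_alt
    simp only [countLoopA, hall, if_true]
  · have hbin : ∀ x ∈ number, x = 0 ∨ x = 1 := by
      rcases hpre with h | h
      · exfalso
        apply hall
        simp only [List.all_eq_true]
        intro x hx
        simpa using h x hx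
      · exact h
    have hz : ∃ x ∈ number, x = 0 := by
      obtain ⟨x, hx, hxf⟩ := List.all_eq_false.mp (Bool.eq_false_iff.mpr hall)
      exact ⟨x, hx, by simp at hxf; exact hxf⟩
    obtain ⟨L, k, rfl, hL⟩ := decomp number hbin hz
    have hNlen : (L ++ 0 :: List.replicate k (1:Int)).length = L.length + 1 + k := by
      simp only [List.length_append, List.length_cons, List.length_replicate]
      omega
    have hA : count (L ++ 0 :: List.replicate k (1:Int))
        = (L ++ 1 :: List.replicate k 0, (k : Int) + 1) := by
      unfold count
      rw [show (((L ++ 0 :: List.replicate k (1:Int)).length : Int) - 1)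
            = ((L.length : Int) + k) by rw [hNlen]; push_cast; ring]
      have happ : L ++ 0 :: List.replicate k (1:Int)
            = L ++ 0 :: (List.replicate k (1:Int) ++ []) := by simp
      rw [happ, loopA k L [] _ (by rw [← happ, hNlen]; omega)]
      simp
    rw [hA]
    unfold count_alt
    rw [if_neg (by simpa using hall)]
    simp only []
    have hval : (L ++ 0 :: List.replicate k (1:Int)).foldl (fun a b => a * 2 + b) 0
        = bval L * 2 ^ (k + 1) + (2 ^ k - 1) := by
      show bval _ = _
      rw [bval_append, bval_cons, bval_replicate_one]
      simp only [List.length_cons, List.length_replicate]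
      ring
    have hm : bval L * 2 ^ (k + 1) + (2 ^ k - 1) + 1 = bval (L ++ 1 :: List.replicate k 0) := by
      rw [bval_append, bval_cons, bval_replicate_zero]
      simp only [List.length_cons, List.length_replicate]
      ring
    have hbinout : ∀ x ∈ L ++ 1 :: List.replicate k (0 : Int), x = 0 ∨ x = 1 := by
      intro x hx
      rcases List.mem_append.mp hx with h | h
      · exact hL x h
      · rcases List.mem_cons.mp h with h' | h'
        · right; exact h'
        · left; exact List.eq_of_mem_replicate h'
    have ha : 0 ≤ bval L := bval_nonneg L hL
    have haa : bval L = ((bval L).toNat : Int) := (Int.toNat_of_nonneg ha).symm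
    have hone : (1 : Nat) ≤ 2 ^ k := Nat.one_le_two_pow
    simp only [Prod.mk.injEq]
    refine ⟨?_, ?_⟩
    · rw [hval, hm,
        show (L ++ 0 :: List.replicate k (1:Int)).length
          = (L ++ 1 :: List.replicate k (0:Int)).length by simp]
      exact (writeBits_bval _ hbinout).symm
    · rw [hval]
      rw [show bval L * 2 ^ (k + 1) + (2 ^ k - 1) + 1
            = ((2 ^ (k + 1) * (bval L).toNat + 2 ^ k : Nat) : Int) by
          push_cast [Int.toNat_of_nonneg ha]; ring]
      rw [show bval L * 2 ^ (k + 1) + (2 ^ k - 1)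
            = ((2 ^ (k + 1) * (bval L).toNat + (2 ^ k - 1) : Nat) : Int) by
          push_cast [Int.toNat_of_nonneg ha, Nat.cast_sub hone]; ring]
      rw [PySem.Int.bxor_natCast, nat_xor_key, bitLength_ones]
      push_cast
      ring
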